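-- pv_equiv track=rewrite | github.com/pypi-data/pypi-mirror-45 | packages/pyxtools/pyxtools-2019.4.20.0.tar.gz/pyxtools-2019.4.20.0/pyxtools/basic_tools/file_tools.py | get_base_name_of_file
-- ===== SOURCE A (Python) =====
-- def get_base_name_of_file(path_or_file_name: str) -> str:
--     if path_or_file_name.find("\\") > -1:
--         path_or_file_name = path_or_file_name.replace("\\", "/")
--
--     name_list = path_or_file_name.split("/")
--     for name in name_list[::-1]:
--         if name:
--             return name
--
--     return path_or_file_name
-- ===== SOURCE B (Python) =====
-- def get_base_name_of_file(path_or_file_name: str) -> str: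
--     if "\\" in path_or_file_name:
--         path_or_file_name = path_or_file_name.replace("\\", "/")
--     chars = []
--     for ch in reversed(path_or_file_name):
--         if ch == '/':
--             if chars:
--                 break
--         else:
--             chars.append(ch)
--     if not chars:
--         return path_or_file_name
--     return ''.join(reversed(chars))
-- ===== Notes on version B (the rewrite author's own statement) =====
-- stated objective: alternative
-- what changed: Instead of splitting the whole path on the separator into a list of pieces and scanning the pieces in reverse for the first non-empty one, B does a single reverse character scan that skips trailing separators, collects the characters of the last segment and stops at the next separator.
import Mathlib
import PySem

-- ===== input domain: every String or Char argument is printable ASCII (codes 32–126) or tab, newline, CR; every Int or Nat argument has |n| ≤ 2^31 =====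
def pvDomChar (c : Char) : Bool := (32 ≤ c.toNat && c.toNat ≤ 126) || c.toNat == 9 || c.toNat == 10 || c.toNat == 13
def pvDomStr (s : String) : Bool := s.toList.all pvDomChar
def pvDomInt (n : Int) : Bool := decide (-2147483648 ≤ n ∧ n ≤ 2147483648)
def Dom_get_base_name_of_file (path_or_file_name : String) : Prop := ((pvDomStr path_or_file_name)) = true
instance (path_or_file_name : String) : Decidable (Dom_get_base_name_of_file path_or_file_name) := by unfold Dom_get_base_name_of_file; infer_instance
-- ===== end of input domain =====

-- B replaces A's split-into-all-pieces-then-reversed-scan by a single reverse character scan that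
-- skips trailing '/' and collects the last segment, stopping early; objective: alternative decomposition.


-- ===== PORT A =====
-- A's 'for name in name_list[::-1]: if name: return name' loop and the final 'return path_or_file_name'
def pickName (names : List (List Char)) (fallback : List Char) : List Char :=
  match names with
  | [] => fallback
  | n :: rest => if n.isEmpty then pickName rest fallback else n

def get_base_name_of_file (path_or_file_name : String) : String :=
  -- if path_or_file_name.find("\\") > -1: path_or_file_name = path_or_file_name.replace("\\", "/")
  let s := if PySem.Chars.find path_or_file_name.toList ['\\'] > -1
           then PySem.Chars.replace path_or_file_name.toList ['\\'] ['/']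
           else path_or_file_name.toList
  let name_list := PySem.Chars.splitOn s ['/']   -- .split("/"), separator nonempty
  String.mk (pickName name_list.reverse s)       -- name_list[::-1] is exactly List.reverse

-- ===== PORT B =====
-- Source B's 'for ch in reversed(path_or_file_name)' loop: chars is the accumulator, break returns it
def altLoop (rev : List Char) (chars : List Char) : List Char :=
  match rev with
  | [] => chars
  | c :: rest =>
      if c == '/' then (if chars.isEmpty then altLoop rest chars else chars)
      else altLoop rest (chars ++ [c])

def get_base_name_of_file_alt (path_or_file_name : String) : String :=
  let s := if PySem.Str.isIn "\\" path_or_file_name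
           then PySem.Chars.replace path_or_file_name.toList ['\\'] ['/']
           else path_or_file_name.toList
  let chars := altLoop s.reverse []
  if chars.isEmpty then String.mk s else String.mk chars.reverse  -- ''.join(reversed(chars))

-- ===== PRECONDITION & SPEC =====
def Spec_get_base_name_of_file (path_or_file_name : String) (out : String) : Prop := out = get_base_name_of_file_alt path_or_file_name
instance (path_or_file_name : String) (out : String) : Decidable (Spec_get_base_name_of_file path_or_file_name out) := by unfold Spec_get_base_name_of_file; infer_instance

-- ===== CLAIM (what is proved, stated in full; the proofs are below) =====
def Claim_equal_get_base_name_of_file : Prop := ∀ (path_or_file_name : String), Dom_get_base_name_of_file path_or_file_name → Spec_get_base_name_of_file path_or_file_name (get_base_name_of_file path_or_file_name)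

-- ===== LEMMAS AND PROOFS =====

-- structural description of split("/"), used to bridge the two ports
def mySplit : List Char → List (List Char)
  | [] => [[]]
  | c :: t => if c = '/' then [] :: mySplit t else (mySplit t).modifyHead (c :: ·)

theorem mySplit_ne_nil : ∀ s, mySplit s ≠ []
  | [] => by simp [mySplit]
  | c :: t => by
    simp only [mySplit]; split
    · simp
    · have := mySplit_ne_nil t
      cases h : mySplit t with
      | nil => exact absurd h this
      | cons a b => simp

theorem splitOn_go_eq (fuel : Nat) : ∀ (l cur : List Char) (accs : List (List Char)),
    l.length ≤ fuel →
    PySem.Chars.splitOn.go ['/'] fuel l cur accs = accs.reverse ++ (mySplit l).modifyHead (cur.reverse ++ ·) := by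
  induction fuel with
  | zero =>
    intro l cur accs h
    have : l = [] := List.eq_nil_of_length_eq_zero (Nat.le_zero.mp h)
    subst this
    simp [PySem.Chars.splitOn.go, mySplit]
  | succ n ih =>
    intro l cur accs h
    cases l with
    | nil => simp [PySem.Chars.splitOn.go, mySplit]
    | cons c rest =>
      rw [PySem.Chars.splitOn.go]
      by_cases hc : c = '/'
      · subst hc
        have hpre : List.isPrefixOf ['/'] ('/' :: rest) = true := by simp [List.isPrefixOf]
        simp only [hpre, List.length_cons, List.drop_succ_cons, List.length_nil, List.drop_zero]
        rw [ih rest [] (cur.reverse :: accs) (by simpa using Nat.le_of_succ_le_succ (by simpa using h))]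
        simp only [mySplit, List.reverse_cons, List.reverse_nil, List.nil_append]
        cases hms : mySplit rest with
        | nil => exact absurd hms (mySplit_ne_nil rest)
        | cons a b => simp
      · have hpre : List.isPrefixOf ['/'] (c :: rest) = false := by
          simp [List.isPrefixOf]
          exact fun hh => hc hh.symm
        simp only [hpre]
        rw [if_neg (by simp)]
        rw [ih rest (c :: cur) accs (by simpa using Nat.le_of_succ_le_succ (by simpa using h))]
        simp only [mySplit, if_neg hc]
        cases hms : mySplit rest with
        | nil => exact absurd hms (mySplit_ne_nil rest)
        | cons a b => simp

theorem splitOn_eq (s : List Char) : PySem.Chars.splitOn s ['/'] = mySplit s := by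
  rw [PySem.Chars.splitOn, splitOn_go_eq (s.length + 1) s [] [] (by omega)]
  cases hms : mySplit s with
  | nil => exact absurd hms (mySplit_ne_nil s)
  | cons a b => simp

theorem mySplit_snoc (xs : List Char) (c : Char) :
    mySplit (xs ++ [c]) =
      if c = '/' then mySplit xs ++ [[]]
      else (mySplit xs).dropLast ++ [(mySplit xs).getLastD [] ++ [c]] := by
  induction xs with
  | nil =>
    by_cases hc : c = '/' <;> simp [mySplit, hc]
  | cons x t ih =>
    simp only [List.cons_append, mySplit]
    rw [ih]
    by_cases hc : c = '/'
    · simp only [hc]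
      by_cases hx : x = '/'
      · simp [hx]
      · simp only [if_neg hx]
        cases hms : mySplit t with
        | nil => exact absurd hms (mySplit_ne_nil t)
        | cons a b =>
          cases b with
          | nil => simp
          | cons b1 b2 => simp
    · simp only [if_neg hc]
      by_cases hx : x = '/'
      · simp only [hx]
        cases hms : mySplit t with
        | nil => exact absurd hms (mySplit_ne_nil t)
        | cons a b =>
          cases b with
          | nil => simp
          | cons b1 b2 => simp
      · simp only [if_neg hx]
        cases hms : mySplit t with
        | nil => exact absurd hms (mySplit_ne_nil t)
        | cons a b =>
          cases b with
          | nil => simp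
          | cons b1 b2 => simp

theorem mySplit_getLastD (xs : List Char) :
    (mySplit xs).getLastD [] = (xs.reverse.takeWhile (· != '/')).reverse := by
  induction xs using List.reverseRecOn with
  | nil => simp [mySplit]
  | append_singleton ys c ih =>
    rw [mySplit_snoc]
    by_cases hc : c = '/'
    · simp [hc]
    · simp only [if_neg hc, List.getLastD_concat, List.reverse_append, List.reverse_singleton,
        List.singleton_append, List.takeWhile_cons]
      have : (c != '/') = true := by simpa using hc
      rw [List.getLastD_eq_getLast?] at ih
      simp [this, ih]

theorem pickName_eq (names : List (List Char)) (fallback : List Char) :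
    pickName names fallback = ((names.find? (fun n => !n.isEmpty)).getD fallback) := by
  induction names with
  | nil => simp [pickName]
  | cons n rest ih =>
    simp only [pickName, List.find?_cons]
    by_cases h : n.isEmpty
    · simp [h, ih]
    · simp [h]

theorem findA (s : List Char) :
    (mySplit s).reverse.find? (fun n => !n.isEmpty) =
      (if (s.reverse.dropWhile (· == '/')).takeWhile (· != '/') = [] then none
       else some (((s.reverse.dropWhile (· == '/')).takeWhile (· != '/')).reverse)) := by
  induction s using List.reverseRecOn with
  | nil => simp [mySplit]
  | append_singleton ys c ih =>
    rw [mySplit_snoc]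
    by_cases hc : c = '/'
    · have : (c == '/') = true := by simpa using hc
      simp only [if_pos hc, List.reverse_append, List.reverse_singleton, List.singleton_append,
        List.find?_cons, List.dropWhile_cons, this]
      simpa using ih
    · have hne : (c != '/') = true := by simpa using hc
      have hee : (c == '/') = false := by simpa using hc
      simp only [if_neg hc, List.reverse_append, List.reverse_singleton, List.singleton_append,
        List.dropWhile_cons, hee, List.takeWhile_cons, hne, List.find?_cons]
      rw [mySplit_getLastD]
      have h2 : (((List.takeWhile (fun x => x != '/') ys.reverse).reverse ++ [c]).isEmpty) = false := by
        simp
      simp [hc, h2]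

theorem altLoop_acc (t : List Char) : ∀ acc : List Char, acc ≠ [] →
    altLoop t acc = acc ++ t.takeWhile (· != '/') := by
  induction t with
  | nil => intro acc _; simp [altLoop]
  | cons c rest ih =>
    intro acc hacc
    simp only [altLoop, List.takeWhile_cons]
    by_cases hc : c = '/'
    · have h1 : (c == '/') = true := by simpa using hc
      have h2 : (c != '/') = false := by simpa using hc
      have h3 : acc.isEmpty = false := by simpa [List.isEmpty_iff] using hacc
      simp [h1, h2, h3]
    · have h1 : (c == '/') = false := by simpa using hc
      have h2 : (c != '/') = true := by simpa using hc
      simp only [h1, Bool.false_eq_true, if_false, h2, if_true]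
      rw [ih (acc ++ [c]) (by simp)]
      simp

theorem altLoop_nil (r : List Char) :
    altLoop r [] = (r.dropWhile (· == '/')).takeWhile (· != '/') := by
  induction r with
  | nil => simp [altLoop]
  | cons c rest ih =>
    simp only [altLoop, List.dropWhile_cons]
    by_cases hc : c = '/'
    · have h1 : (c == '/') = true := by simpa using hc
      simp [h1, ih]
    · have h1 : (c == '/') = false := by simpa using hc
      have h2 : (c != '/') = true := by simpa using hc
      simp only [h1, Bool.false_eq_true, if_false, List.nil_append]
      rw [altLoop_acc rest [c] (by simp)]
      simp [h2]

theorem cond_eq (p : String) :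
    (PySem.Chars.find p.toList ['\\'] > -1) ↔ PySem.Str.isIn "\\" p = true := by
  have h := PySem.Chars.neg_one_le_find p.toList ['\\']
  constructor
  · intro hgt
    have : PySem.Chars.find p.toList ['\\'] ≠ -1 := by omega
    simpa [PySem.Str.isIn, PySem.Chars.isIn, bne_iff_ne] using this
  · intro hin
    have : PySem.Chars.find p.toList ['\\'] ≠ -1 := by
      simpa [PySem.Str.isIn, PySem.Chars.isIn, bne_iff_ne] using hin
    omega

-- ===== VERDICT (by name: the statement is the Claim_ definition above) =====
theorem get_base_name_of_file_spec : Claim_equal_get_base_name_of_file := by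
  intro p _
  unfold Spec_get_base_name_of_file get_base_name_of_file get_base_name_of_file_alt
  simp only []
  rw [if_congr (cond_eq p) rfl rfl]
  set s := if PySem.Str.isIn "\\" p = true then PySem.Chars.replace p.toList ['\\'] ['/'] else p.toList with hs
  rw [splitOn_eq, pickName_eq, altLoop_nil, findA]
  by_cases h : (s.reverse.dropWhile (· == '/')).takeWhile (· != '/') = [] <;> simp [h]
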